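-- pv_equiv track=rewrite | github.com/zerowsw/Simia-WM-Exp | Simia_SFT/Tau2/utils/conversation_generator.py | parse_gpt_response
-- ===== SOURCE A (Python) =====
-- from typing import Dict, List, Any, Optional
--
-- def parse_gpt_response(response_text: str) -> Dict[str, Any]:
--     """Parse GPT response and convert to ShareGPT format"""
--
--
--     lines = response_text.strip().split('\n')
--     conversations = []
--
--     current_role = None
--     current_content = []
--
--     for line in lines:
--         line = line.strip()
--         if line.startswith('HUMAN:') or line.startswith('H:'):
--             if current_role and current_content:
--                 conversations.append({
--                     "from": current_role,
--                     "value": '\n'.join(current_content).strip()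
--                 })
--             current_role = "human"
--             if line.startswith('HUMAN:'):
--                 current_content = [line[6:].strip()]
--             elif line.startswith('H:'):
--                 current_content = [line[2:].strip()]
--         elif line.startswith('ASSISTANT:') or line.startswith('A:'):
--             if current_role and current_content:
--                 conversations.append({
--                     "from": current_role,
--                     "value": '\n'.join(current_content).strip()
--                 })
--             current_role = "gpt"
--             if line.startswith('ASSISTANT:'):
--                 current_content = [line[10:].strip()]
--             elif line.startswith('A:'):
--                 current_content = [line[2:].strip()]
--         elif line.startswith('FUNCTION_CALL:'):
--             if current_role and current_content:
--                 conversations.append({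
--                     "from": current_role,
--                     "value": '\n'.join(current_content).strip()
--                 })
--             current_role = "function_call"
--             current_content = [line[14:].strip()]
--         elif line.startswith('OBSERVATION:'):
--             if current_role and current_content:
--                 conversations.append({
--                     "from": current_role,
--                     "value": '\n'.join(current_content).strip()
--                 })
--             current_role = "observation"
--             current_content = [line[12:].strip()]
--         elif line and current_role:
--             current_content.append(line)
--
--
--     if current_role and current_content:
--         conversations.append({
--             "from": current_role,
--             "value": '\n'.join(current_content).strip()
--         })
--
--
--     return {
--         "conversations": conversations
--     }
-- ===== SOURCE B (Python) =====
-- def parse_gpt_response(response_text):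
--     """Parse GPT response and convert to ShareGPT format"""
--     ROLES = [('HUMAN:', 'human'), ('H:', 'human'),
--              ('ASSISTANT:', 'gpt'), ('A:', 'gpt'),
--              ('FUNCTION_CALL:', 'function_call'),
--              ('OBSERVATION:', 'observation')]
--
--     def classify(line):
--         for prefix, role in ROLES:
--             if line.startswith(prefix):
--                 return role, line[len(prefix):].strip()
--         return None
--
--     def split_at_marker(lines):
--         """(lines before the next marker line, remainder starting at it)"""
--         for i, l in enumerate(lines):
--             if classify(l) is not None:
--                 return lines[:i], lines[i:]
--         return lines, []
--
--     def parse(lines):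
--         _pre, lines = split_at_marker(lines)   # drop prose before the next marker
--         if not lines:
--             return []
--         role, first = classify(lines[0])
--         body, rest = split_at_marker(lines[1:])
--         value = '\n'.join([first] + [l for l in body if l]).strip()
--         return [{"from": role, "value": value}] + parse(rest)
--
--     return {"conversations": parse([l.strip() for l in response_text.strip().split('\n')])}
-- ===== Notes on version B (the rewrite author's own statement) =====
-- stated objective: alternative
-- what changed: B is a recursive descent that, per call, splits the remaining lines at the next marker line (split_at_marker), formats that one segment and recurses on the remainder, instead of A's single imperative scan carrying role/content accumulator state with an inline flush block repeated four times.
import Mathlib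
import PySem

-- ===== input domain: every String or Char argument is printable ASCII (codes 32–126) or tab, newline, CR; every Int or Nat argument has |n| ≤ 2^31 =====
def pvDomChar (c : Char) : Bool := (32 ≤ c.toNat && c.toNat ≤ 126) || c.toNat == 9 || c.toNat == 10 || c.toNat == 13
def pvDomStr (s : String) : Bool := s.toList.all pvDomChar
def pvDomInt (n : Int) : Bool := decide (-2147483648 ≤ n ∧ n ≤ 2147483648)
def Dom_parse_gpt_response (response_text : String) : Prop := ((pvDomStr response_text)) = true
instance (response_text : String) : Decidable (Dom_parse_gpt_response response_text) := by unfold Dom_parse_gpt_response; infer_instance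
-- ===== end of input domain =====

-- B replaces A's single accumulator scan by a recursive descent consuming one marker-delimited segment per call (objective: alternative, same cost).

-- ===== PORT A =====
-- A repeats one identical flush block inline four times (plus once after the loop); it is factored here verbatim.
def pvFlushA (convs : List (List (String × String))) (role : Option String)
    (content : List String) : List (List (String × String)) :=
  match role with
  | some r =>
      if content ≠ [] then
        convs ++ [[("from", r), ("value", PySem.Str.strip (PySem.Str.join "\n" content))]]
      else convs
  | none => convs

def pvStepA (st : List (List (String × String)) × Option String × List String)
    (rawline : String) : List (List (String × String)) × Option String × List String :=
  let convs := st.1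
  let role := st.2.1
  let content := st.2.2
  let line := PySem.Str.strip rawline
  if PySem.Str.startswith line "HUMAN:" || PySem.Str.startswith line "H:" then
    let convs := pvFlushA convs role content
    if PySem.Str.startswith line "HUMAN:" then
      (convs, some "human", [PySem.Str.strip (PySem.Str.slice line (some 6) none)])
    else if PySem.Str.startswith line "H:" then
      (convs, some "human", [PySem.Str.strip (PySem.Str.slice line (some 2) none)])
    else (convs, some "human", content)
  else if PySem.Str.startswith line "ASSISTANT:" || PySem.Str.startswith line "A:" then
    let convs := pvFlushA convs role content
    if PySem.Str.startswith line "ASSISTANT:" then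
      (convs, some "gpt", [PySem.Str.strip (PySem.Str.slice line (some 10) none)])
    else if PySem.Str.startswith line "A:" then
      (convs, some "gpt", [PySem.Str.strip (PySem.Str.slice line (some 2) none)])
    else (convs, some "gpt", content)
  else if PySem.Str.startswith line "FUNCTION_CALL:" then
    (pvFlushA convs role content, some "function_call",
      [PySem.Str.strip (PySem.Str.slice line (some 14) none)])
  else if PySem.Str.startswith line "OBSERVATION:" then
    (pvFlushA convs role content, some "observation",
      [PySem.Str.strip (PySem.Str.slice line (some 12) none)])
  else if line ≠ "" ∧ role.isSome then
    (convs, role, content ++ [line])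
  else (convs, role, content)

def parse_gpt_response (response_text : String) : List (String × List (List (String × String))) :=
  let lines := (PySem.Str.split? (PySem.Str.strip response_text) "\n").getD []
  let st := lines.foldl pvStepA ([], none, [])
  [("conversations", pvFlushA st.1 st.2.1 st.2.2)]

-- ===== PORT B =====
def pvMarkers : List (String × String) :=
  [("HUMAN:", "human"), ("H:", "human"), ("ASSISTANT:", "gpt"), ("A:", "gpt"),
   ("FUNCTION_CALL:", "function_call"), ("OBSERVATION:", "observation")]

-- B's classify: first matching marker prefix → (role, rest of the line stripped)
def pvClassify (line : String) : Option (String × String) :=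
  (pvMarkers.find? (fun m => PySem.Str.startswith line m.1)).map
    (fun m => (m.2, PySem.Str.strip (PySem.Str.slice line (some (PySem.Str.len m.1 : Int)) none)))

-- B's split_at_marker: scan for the first marker line, return (prefix before it, remainder)
def pvSplit (lines : List String) : List String × List String :=
  match lines with
  | [] => ([], [])
  | l :: rest =>
      if (pvClassify l).isNone then
        let p := pvSplit rest
        (l :: p.1, p.2)
      else ([], l :: rest)

theorem pvSplit_snd_length_le (lines : List String) : (pvSplit lines).2.length ≤ lines.length := by
  induction lines with
  | nil => simp [pvSplit]
  | cons l rest ih =>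
      simp only [pvSplit]
      split
      · simpa using Nat.le_succ_of_le ih
      · simp

-- B's parse: one segment per call; pvParse drops prose before the next marker
-- (split_at_marker) and pvParseAux handles the remainder, which starts at a marker (or is empty)
def pvParseAux (lines : List String) : List (List (String × String)) :=
  match lines with
  | [] => []
  | first :: rest =>
      match pvClassify first with
      | some rh =>
          let body := ((pvSplit rest).1).filter (fun l => l ≠ "")
          [("from", rh.1), ("value", PySem.Str.strip (PySem.Str.join "\n" (rh.2 :: body)))] ::
            pvParseAux (pvSplit rest).2
      | none => []   -- unreachable: pvParseAux is only applied to [] or a list starting at a marker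
  termination_by lines.length
  decreasing_by
    have := pvSplit_snd_length_le rest
    simp only [List.length_cons]
    omega

def pvParse (lines : List String) : List (List (String × String)) :=
  pvParseAux (pvSplit lines).2

def parse_gpt_response_alt (response_text : String) : List (String × List (List (String × String))) :=
  let lines := ((PySem.Str.split? (PySem.Str.strip response_text) "\n").getD []).map PySem.Str.strip
  [("conversations", pvParse lines)]

-- ===== PRECONDITION & SPEC =====
def Spec_parse_gpt_response (response_text : String) (out : List (String × List (List (String × String)))) : Prop := out = parse_gpt_response_alt response_text
instance (response_text : String) (out : List (String × List (List (String × String)))) : Decidable (Spec_parse_gpt_response response_text out) := by unfold Spec_parse_gpt_response; infer_instance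

-- ===== CLAIM (what is proved, stated in full; the proofs are below) =====
def Claim_equal_parse_gpt_response : Prop := ∀ (response_text : String), Dom_parse_gpt_response response_text → Spec_parse_gpt_response response_text (parse_gpt_response response_text)

-- ===== LEMMAS AND PROOFS =====

-- formatting of one (role, parts) segment (proof-side abbreviation of the dict literal)
def pvFmt (seg : String × List String) : List (String × String) :=
  [("from", seg.1), ("value", PySem.Str.strip (PySem.Str.join "\n" seg.2))]

-- proof-side intermediate: a fold that groups raw lines into (role, parts) segments
def pvStepB (segs : List (String × List String)) (raw : String) : List (String × List String) :=
  let line := PySem.Str.strip raw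
  match pvMarkers.find? (fun m => PySem.Str.startswith line m.1) with
  | some (pre, role) =>
      segs ++ [(role, [PySem.Str.strip (PySem.Str.slice line (some (PySem.Str.len pre : Int)) none)])]
  | none =>
      if line = "" then segs
      else
        match segs.getLast? with
        | some (role, parts) => segs.dropLast ++ [(role, parts ++ [line])]
        | none => segs

-- A's loop state corresponding to the segment list
def pvS (segs : List (String × List String)) :
    List (List (String × String)) × Option String × List String :=
  match segs.getLast? with
  | some (r, ps) => (segs.dropLast.map pvFmt, some r, ps)
  | none => ([], none, [])

def pvInv (segs : List (String × List String)) : Prop := ∀ p ∈ segs, p.2 ≠ []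

theorem pvInv_step (segs : List (String × List String)) (raw : String) (h : pvInv segs) :
    pvInv (pvStepB segs raw) := by
  intro p hp
  unfold pvStepB at hp
  dsimp only at hp
  rcases hf : pvMarkers.find? (fun m => PySem.Str.startswith (PySem.Str.strip raw) m.1) with _ | ⟨pre, role⟩ <;>
    rw [hf] at hp
  · by_cases h0 : PySem.Str.strip raw = ""
    · rw [if_pos h0] at hp; exact h p hp
    · rw [if_neg h0] at hp
      rcases hl : segs.getLast? with _ | ⟨role, parts⟩ <;> rw [hl] at hp
      · exact h p hp
      · simp only [List.mem_append, List.mem_singleton] at hp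
        rcases hp with hp | hp
        · exact h p (List.dropLast_subset _ hp)
        · subst hp; simp
  · simp only [List.mem_append, List.mem_singleton] at hp
    rcases hp with hp | hp
    · exact h p hp
    · subst hp; simp

set_option maxHeartbeats 1000000 in
theorem pvStep_eq (segs : List (String × List String)) (raw : String) (h : pvInv segs) :
    pvStepA (pvS segs) raw = pvS (pvStepB segs raw) := by
  have e1 : PySem.Chars.startswith [] ['H','U','M','A','N',':'] = false := by decide
  have e2 : PySem.Chars.startswith [] ['H',':'] = false := by decide
  have e3 : PySem.Chars.startswith [] ['A','S','S','I','S','T','A','N','T',':'] = false := by decide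
  have e4 : PySem.Chars.startswith [] ['A',':'] = false := by decide
  have e5 : PySem.Chars.startswith [] ['F','U','N','C','T','I','O','N','_','C','A','L','L',':'] = false := by decide
  have e6 : PySem.Chars.startswith [] ['O','B','S','E','R','V','A','T','I','O','N',':'] = false := by decide
  unfold pvStepA pvStepB
  dsimp only
  rcases List.eq_nil_or_concat segs with rfl | ⟨l, e, rfl⟩
  · by_cases h1 : PySem.Chars.startswith (PySem.Chars.strip raw.toList) ['H','U','M','A','N',':'] = true
    · rw [show pvMarkers.find? (fun m => PySem.Str.startswith (PySem.Str.strip raw) m.1) = some ("HUMAN:", "human") from by simp [pvMarkers, h1]]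
      simp [h1, pvS, pvFlushA]
    by_cases h2 : PySem.Chars.startswith (PySem.Chars.strip raw.toList) ['H',':'] = true
    · rw [show pvMarkers.find? (fun m => PySem.Str.startswith (PySem.Str.strip raw) m.1) = some ("H:", "human") from by simp [pvMarkers, h1, h2]]
      simp [h1, h2, pvS, pvFlushA]
    by_cases h3 : PySem.Chars.startswith (PySem.Chars.strip raw.toList) ['A','S','S','I','S','T','A','N','T',':'] = true
    · rw [show pvMarkers.find? (fun m => PySem.Str.startswith (PySem.Str.strip raw) m.1) = some ("ASSISTANT:", "gpt") from by simp [pvMarkers, h1, h2, h3]]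
      simp [h1, h2, h3, pvS, pvFlushA]
    by_cases h4 : PySem.Chars.startswith (PySem.Chars.strip raw.toList) ['A',':'] = true
    · rw [show pvMarkers.find? (fun m => PySem.Str.startswith (PySem.Str.strip raw) m.1) = some ("A:", "gpt") from by simp [pvMarkers, h1, h2, h3, h4]]
      simp [h1, h2, h3, h4, pvS, pvFlushA]
    by_cases h5 : PySem.Chars.startswith (PySem.Chars.strip raw.toList) ['F','U','N','C','T','I','O','N','_','C','A','L','L',':'] = true
    · rw [show pvMarkers.find? (fun m => PySem.Str.startswith (PySem.Str.strip raw) m.1) = some ("FUNCTION_CALL:", "function_call") from by simp [pvMarkers, h1, h2, h3, h4, h5]]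
      simp [h1, h2, h3, h4, h5, pvS, pvFlushA]
    by_cases h6 : PySem.Chars.startswith (PySem.Chars.strip raw.toList) ['O','B','S','E','R','V','A','T','I','O','N',':'] = true
    · rw [show pvMarkers.find? (fun m => PySem.Str.startswith (PySem.Str.strip raw) m.1) = some ("OBSERVATION:", "observation") from by simp [pvMarkers, h1, h2, h3, h4, h5, h6]]
      simp [h1, h2, h3, h4, h5, h6, pvS, pvFlushA]
    by_cases h0 : PySem.Str.strip raw = "" <;>
    rw [show pvMarkers.find? (fun m => PySem.Str.startswith (PySem.Str.strip raw) m.1) = none from by simp [pvMarkers, h1, h2, h3, h4, h5, h6]] <;>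
    simp [h1, h2, h3, h4, h5, h6, h0, e1, e2, e3, e4, e5, e6, pvS]
  · obtain ⟨r, ps⟩ := e
    have hps : ps ≠ [] := h (r, ps) (by simp)
    by_cases h1 : PySem.Chars.startswith (PySem.Chars.strip raw.toList) ['H','U','M','A','N',':'] = true
    · rw [show pvMarkers.find? (fun m => PySem.Str.startswith (PySem.Str.strip raw) m.1) = some ("HUMAN:", "human") from by simp [pvMarkers, h1]]
      simp [h1, pvS, pvFlushA, pvFmt, hps]
    by_cases h2 : PySem.Chars.startswith (PySem.Chars.strip raw.toList) ['H',':'] = true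
    · rw [show pvMarkers.find? (fun m => PySem.Str.startswith (PySem.Str.strip raw) m.1) = some ("H:", "human") from by simp [pvMarkers, h1, h2]]
      simp [h1, h2, pvS, pvFlushA, pvFmt, hps]
    by_cases h3 : PySem.Chars.startswith (PySem.Chars.strip raw.toList) ['A','S','S','I','S','T','A','N','T',':'] = true
    · rw [show pvMarkers.find? (fun m => PySem.Str.startswith (PySem.Str.strip raw) m.1) = some ("ASSISTANT:", "gpt") from by simp [pvMarkers, h1, h2, h3]]
      simp [h1, h2, h3, pvS, pvFlushA, pvFmt, hps]
    by_cases h4 : PySem.Chars.startswith (PySem.Chars.strip raw.toList) ['A',':'] = true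
    · rw [show pvMarkers.find? (fun m => PySem.Str.startswith (PySem.Str.strip raw) m.1) = some ("A:", "gpt") from by simp [pvMarkers, h1, h2, h3, h4]]
      simp [h1, h2, h3, h4, pvS, pvFlushA, pvFmt, hps]
    by_cases h5 : PySem.Chars.startswith (PySem.Chars.strip raw.toList) ['F','U','N','C','T','I','O','N','_','C','A','L','L',':'] = true
    · rw [show pvMarkers.find? (fun m => PySem.Str.startswith (PySem.Str.strip raw) m.1) = some ("FUNCTION_CALL:", "function_call") from by simp [pvMarkers, h1, h2, h3, h4, h5]]
      simp [h1, h2, h3, h4, h5, pvS, pvFlushA, pvFmt, hps]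
    by_cases h6 : PySem.Chars.startswith (PySem.Chars.strip raw.toList) ['O','B','S','E','R','V','A','T','I','O','N',':'] = true
    · rw [show pvMarkers.find? (fun m => PySem.Str.startswith (PySem.Str.strip raw) m.1) = some ("OBSERVATION:", "observation") from by simp [pvMarkers, h1, h2, h3, h4, h5, h6]]
      simp [h1, h2, h3, h4, h5, h6, pvS, pvFlushA, pvFmt, hps]
    by_cases h0 : PySem.Str.strip raw = "" <;>
    rw [show pvMarkers.find? (fun m => PySem.Str.startswith (PySem.Str.strip raw) m.1) = none from by simp [pvMarkers, h1, h2, h3, h4, h5, h6]] <;>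
    simp [h1, h2, h3, h4, h5, h6, h0, e1, e2, e3, e4, e5, e6, pvS]

theorem pvFold_sim (lines : List String) (segs : List (String × List String)) (h : pvInv segs) :
    lines.foldl pvStepA (pvS segs) = pvS (lines.foldl pvStepB segs) ∧
      pvInv (lines.foldl pvStepB segs) := by
  induction lines generalizing segs with
  | nil => exact ⟨rfl, h⟩
  | cons l ls ih =>
      have he := pvStep_eq segs l h
      have hi := pvInv_step segs l h
      simpa [List.foldl_cons, he] using ih (pvStepB segs l) hi

theorem pvFlush_final (segs : List (String × List String)) (h : pvInv segs) :
    pvFlushA (pvS segs).1 (pvS segs).2.1 (pvS segs).2.2 = segs.map pvFmt := by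
  rcases List.eq_nil_or_concat segs with rfl | ⟨l, e, rfl⟩
  · rfl
  · obtain ⟨r, ps⟩ := e
    have hps : ps ≠ [] := h (r, ps) (by simp)
    simp [pvS, pvFlushA, pvFmt, hps]

-- bridge: the segment fold equals B's recursive descent
theorem pvStepB_classify (segs : List (String × List String)) (raw : String) :
    pvStepB segs raw =
      match pvClassify (PySem.Str.strip raw) with
      | some rh => segs ++ [(rh.1, [rh.2])]
      | none =>
          if PySem.Str.strip raw = "" then segs
          else
            match segs.getLast? with
            | some (role, parts) => segs.dropLast ++ [(role, parts ++ [raw |> PySem.Str.strip])]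
            | none => segs := by
  unfold pvStepB pvClassify
  dsimp only
  rcases hf : pvMarkers.find? (fun m => PySem.Str.startswith (PySem.Str.strip raw) m.1) with _ | ⟨pre, role⟩ <;> rw [hf] <;> rfl

theorem pvL2 (lines : List String) (init : List (String × List String)) (r : String) (ps : List String) :
    ((lines.foldl pvStepB (init ++ [(r, ps)])).map pvFmt)
      = init.map pvFmt ++
          pvFmt (r, ps ++ ((pvSplit (lines.map PySem.Str.strip)).1.filter (fun l => l ≠ ""))) ::
          pvParseAux ((pvSplit (lines.map PySem.Str.strip)).2) := by
  induction lines generalizing init r ps with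
  | nil => simp [pvSplit, pvParseAux]
  | cons l rest ih =>
      rcases hc : pvClassify (PySem.Str.strip l) with _ | ⟨role, head⟩
      · by_cases h0 : PySem.Str.strip l = ""
        · have hstep : pvStepB (init ++ [(r, ps)]) l = init ++ [(r, ps)] := by
            rw [pvStepB_classify, hc]; simp [h0]
          simp only [List.foldl_cons, hstep, List.map_cons, pvSplit, hc, Option.isNone_none,
            if_pos, ih]
          simp [h0]
        · have hstep : pvStepB (init ++ [(r, ps)]) l = init ++ [(r, ps ++ [PySem.Str.strip l])] := by
            rw [pvStepB_classify, hc]; simp [h0]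
          simp only [List.foldl_cons, hstep, List.map_cons, pvSplit, hc, Option.isNone_none,
            if_pos, ih]
          simp [h0]
      · have hstep : pvStepB (init ++ [(r, ps)]) l = (init ++ [(r, ps)]) ++ [(role, [head])] := by
          rw [pvStepB_classify, hc]
        have hsplit : pvSplit (PySem.Str.strip l :: rest.map PySem.Str.strip)
            = ([], PySem.Str.strip l :: rest.map PySem.Str.strip) := by
          simp [pvSplit, hc]
        have haux : pvParseAux (PySem.Str.strip l :: rest.map PySem.Str.strip)
            = pvFmt (role, head :: ((pvSplit (rest.map PySem.Str.strip)).1.filter (fun l => l ≠ ""))) ::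
                pvParseAux ((pvSplit (rest.map PySem.Str.strip)).2) := by
          rw [pvParseAux]; simp [hc, pvFmt]
        rw [List.map_cons, hsplit, List.foldl_cons, hstep, ih]
        simp [haux, pvFmt]

theorem pvL1 (lines : List String) :
    ((lines.foldl pvStepB []).map pvFmt) = pvParseAux ((pvSplit (lines.map PySem.Str.strip)).2) := by
  induction lines with
  | nil => simp [pvSplit, pvParseAux]
  | cons l rest ih =>
      rcases hc : pvClassify (PySem.Str.strip l) with _ | ⟨role, head⟩
      · have hstep : pvStepB [] l = [] := by
          rw [pvStepB_classify, hc]; by_cases h0 : PySem.Str.strip l = "" <;> simp [h0]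
        simp only [List.foldl_cons, hstep, List.map_cons, pvSplit, hc, Option.isNone_none, if_pos, ih]
      · have hstep : pvStepB [] l = [(role, [head])] := by
          rw [pvStepB_classify, hc]; rfl
        have hsplit : pvSplit (PySem.Str.strip l :: rest.map PySem.Str.strip)
            = ([], PySem.Str.strip l :: rest.map PySem.Str.strip) := by
          simp [pvSplit, hc]
        have haux : pvParseAux (PySem.Str.strip l :: rest.map PySem.Str.strip)
            = pvFmt (role, head :: ((pvSplit (rest.map PySem.Str.strip)).1.filter (fun l => l ≠ ""))) ::
                pvParseAux ((pvSplit (rest.map PySem.Str.strip)).2) := by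
          rw [pvParseAux]; simp [hc, pvFmt]
        rw [List.map_cons, List.foldl_cons, hstep,
          show [(role, [head])] = ([] : List (String × List String)) ++ [(role, [head])] from rfl,
          pvL2]
        simp [hsplit, haux, pvFmt]

-- ===== VERDICT (by name: the statement is the Claim_ definition above) =====
theorem parse_gpt_response_spec : Claim_equal_parse_gpt_response := by
  intro rt _
  unfold Spec_parse_gpt_response parse_gpt_response parse_gpt_response_alt
  have h0 : pvInv ([] : List (String × List String)) := by intro p hp; simp at hp
  obtain ⟨he, hi⟩ := pvFold_sim ((PySem.Str.split? (PySem.Str.strip rt) "\n").getD []) [] h0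
  have hA : (((PySem.Str.split? (PySem.Str.strip rt) "\n").getD []).foldl pvStepA ([], none, [])) =
      pvS (((PySem.Str.split? (PySem.Str.strip rt) "\n").getD []).foldl pvStepB []) := by
    simpa [pvS] using he
  simp only [hA]
  rw [pvFlush_final _ hi, pvL1]
  rfl
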